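-- pv_equiv track=rewrite | github.com/pegasd/codewars | is-my-friend-cheating.py | removNb_one
-- ===== SOURCE A (Python) =====
-- def removNb_one(n):
--     """
--
--     First iteration
--
--     Slow for multiple reasons:
--         * iterating over the whole list twice
--         * array sum is calculated on each pass
--
--     O(n^2) + some more for calculating list sum on each pass
--
--     """
--     result = []
--     myrange = range(1, n + 1)
--     for x in range(1, n + 1):
--         for y in range(1, n + 1):
--             if x == y:
--                 continue
--             mylist = list(myrange)
--             mylist.remove(x)
--             mylist.remove(y)
--             if x * y == sum(mylist):
--                 result.append((x, y))
--                 result.append((y, x))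
--     return result
-- ===== SOURCE B (Python) =====
-- def removNb_one(n):
--     """O(n): for each x solve x*y == S - x - y, i.e. y = (S - x) / (x + 1), S = n(n+1)/2."""
--     result = []
--     total = n * (n + 1) // 2
--     for x in range(1, n + 1):
--         q, r = divmod(total - x, x + 1)
--         if r == 0 and 1 <= q <= n and q != x:
--             result.append((x, q))
--             result.append((q, x))
--     return result
-- ===== Notes on version B (the rewrite author's own statement) =====
-- stated objective: faster
-- what changed: Replaces the double loop over all ordered pairs (each pass rebuilding the list, removing x and y and summing it) by a single loop over x that solves x*y = S - x - y in closed form as y = (S - x) / (x + 1) with S = n(n+1)/2, checking divisibility and range.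
import Mathlib
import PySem

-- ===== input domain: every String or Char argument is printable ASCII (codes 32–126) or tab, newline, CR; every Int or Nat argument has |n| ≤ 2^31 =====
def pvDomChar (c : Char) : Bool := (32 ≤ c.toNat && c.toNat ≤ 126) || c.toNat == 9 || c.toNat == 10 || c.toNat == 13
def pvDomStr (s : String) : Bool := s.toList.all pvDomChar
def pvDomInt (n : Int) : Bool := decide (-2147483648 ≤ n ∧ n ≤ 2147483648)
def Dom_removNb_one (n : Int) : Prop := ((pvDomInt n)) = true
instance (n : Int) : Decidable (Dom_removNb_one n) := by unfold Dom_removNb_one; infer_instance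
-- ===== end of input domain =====

-- B replaces A's cubic scan (double loop plus a list rebuild and sum per pair) by a single
-- O(n) loop that solves x*y = S - x - y for y in closed form; objective: faster (asymptotic).

-- ===== PORT A =====
def removNb_one (n : Int) : List (Int × Int) :=
  let myrange := PySem.List.pyRange 1 (n + 1) 1
  (PySem.List.pyRange 1 (n + 1) 1).foldl (fun result x =>
    (PySem.List.pyRange 1 (n + 1) 1).foldl (fun result y =>
      if x == y then result
      else
        -- x and y are always elements of myrange here, so list.remove never raises (none unreachable)
        let mylist := (PySem.List.remove? myrange x).getD []
        let mylist := (PySem.List.remove? mylist y).getD []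
        if x * y == mylist.sum then result ++ [(x, y)] ++ [(y, x)]
        else result) result) []

-- ===== PORT B =====
def removNb_one_alt (n : Int) : List (Int × Int) :=
  let total := PySem.Int.floordiv (n * (n + 1)) 2
  (PySem.List.pyRange 1 (n + 1) 1).foldl (fun result x =>
    -- inside the loop x + 1 is positive, so Python's divmod never raises
    let q := PySem.Int.floordiv (total - x) (x + 1)
    let r := PySem.Int.mod (total - x) (x + 1)
    if r == 0 && decide (1 ≤ q) && decide (q ≤ n) && q != x then
      result ++ [(x, q)] ++ [(q, x)]
    else result) []

-- ===== PRECONDITION & SPEC =====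
def Spec_removNb_one (n : Int) (out : List (Int × Int)) : Prop := out = removNb_one_alt n
instance (n : Int) (out : List (Int × Int)) : Decidable (Spec_removNb_one n out) := by unfold Spec_removNb_one; infer_instance

-- ===== CLAIM (what is proved, stated in full; the proofs are below) =====
def Claim_equal_removNb_one : Prop := ∀ (n : Int), Dom_removNb_one n → Spec_removNb_one n (removNb_one n)

-- ===== LEMMAS AND PROOFS =====

-- Gauss: twice the sum of range(1, n+1) is n*(n+1)
lemma sum_pyRange_one_mul_two (n : Int) (hn : 0 ≤ n) :
    (PySem.List.pyRange 1 (n + 1) 1).sum * 2 = n * (n + 1) := by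
  obtain ⟨m, rfl⟩ : ∃ m : Nat, n = (m : Int) := ⟨n.toNat, (Int.toNat_of_nonneg hn).symm⟩
  induction m with
  | zero => simp [PySem.List.pyRange_one_eq_nil]
  | succ k ih =>
    have h1 : ((k + 1 : Nat) : Int) = (k : Int) + 1 := by push_cast; ring
    rw [h1, PySem.List.pyRange_one_succ_right (by omega)]
    simp only [List.sum_append, List.sum_cons, List.sum_nil]
    have ih' := ih (by omega)
    nlinarith [ih']

lemma total_eq_sum (n : Int) (hn : 0 ≤ n) :
    PySem.Int.floordiv (n * (n + 1)) 2 = (PySem.List.pyRange 1 (n + 1) 1).sum := by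
  rw [← sum_pyRange_one_mul_two n hn, PySem.Int.floordiv_eq_ediv_of_pos (by norm_num)]
  exact Int.mul_ediv_cancel _ (by norm_num)

-- flatMap of an 'only at y = q' function over a duplicate-free list
lemma flatMap_if_eq {α : Type} (q : Int) (h : Int → List α) :
    ∀ (l : List Int), l.Nodup →
      (l.flatMap (fun y => if y = q then h y else [])) = if q ∈ l then h q else [] := by
  intro l
  induction l with
  | nil => simp
  | cons a t ih =>
    intro hnd
    rcases List.nodup_cons.mp hnd with ⟨ha, ht⟩
    by_cases hq : a = q
    · subst hq
      simp [List.flatMap_cons, ih ht, ha]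
    · have hq' : ¬q = a := fun h' => hq h'.symm
      by_cases hm : q ∈ t
      · simp [List.flatMap_cons, hq, hq', ih ht, hm]
      · simp [List.flatMap_cons, hq, hq', ih ht, hm]

-- the inner y-loop of A, for 1 ≤ x ≤ n, computes exactly B's closed-form step
lemma inner_loop_eq (n x S q r : Int) (hx1 : 1 ≤ x) (hx2 : x ≤ n)
    (hS : S = (PySem.List.pyRange 1 (n + 1) 1).sum)
    (hq : q = PySem.Int.floordiv (S - x) (x + 1))
    (hr : r = PySem.Int.mod (S - x) (x + 1))
    (acc : List (Int × Int)) :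
    (PySem.List.pyRange 1 (n + 1) 1).foldl (fun result y =>
      if x == y then result
      else
        let mylist := (PySem.List.remove? (PySem.List.pyRange 1 (n + 1) 1) x).getD []
        let mylist := (PySem.List.remove? mylist y).getD []
        if x * y == mylist.sum then result ++ [(x, y)] ++ [(y, x)]
        else result) acc
    = (if r == 0 && decide (1 ≤ q) && decide (q ≤ n) && q != x then
         acc ++ [(x, q)] ++ [(q, x)]
       else acc) := by
  have hxpos : (0 : Int) < x + 1 := by omega
  have hxmem : x ∈ PySem.List.pyRange 1 (n + 1) 1 := by
    rw [PySem.List.mem_pyRange_one]; omega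
  have hdvd_iff : r = 0 ↔ (x + 1) ∣ (S - x) := by
    rw [hr]; exact PySem.Int.mod_eq_zero_iff_dvd _ _
  have hqmul : (x + 1) ∣ (S - x) → q * (x + 1) = S - x := by
    intro hd
    rw [hq, PySem.Int.floordiv_eq_ediv_of_pos hxpos]
    exact Int.ediv_mul_cancel hd
  -- step 1: the inner body equals an unconditional append, on elements of the range
  rw [PySem.List.foldl_congr_mem' (PySem.List.pyRange 1 (n + 1) 1) _
    (fun result y => result ++ (if y = q ∧ (r = 0 ∧ q ≠ x) then [(x, y), (y, x)] else [])) acc ?_]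
  · rw [PySem.List.foldl_append_eq_flatMap]
    -- step 2: collapse the flatMap over the duplicate-free range
    by_cases hC : r = 0 ∧ q ≠ x
    · have hfun : (fun y => if y = q ∧ (r = 0 ∧ q ≠ x) then [(x, y), (y, x)] else ([] : List (Int × Int)))
          = (fun y => if y = q then [(x, y), (y, x)] else []) := by
        funext y
        by_cases hyq : y = q
        · simp [hyq, hC]
        · simp [hyq]
      rw [hfun, flatMap_if_eq q _ _ (PySem.List.nodup_pyRange_one 1 (n + 1))]
      by_cases hm : q ∈ PySem.List.pyRange 1 (n + 1) 1
      · have hqb := (PySem.List.mem_pyRange_one).mp hm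
        rw [if_pos hm]
        have hb : (r == 0 && decide (1 ≤ q) && decide (q ≤ n) && q != x) = true := by
          simp only [Bool.and_eq_true, beq_iff_eq, decide_eq_true_eq, bne_iff_ne]
          exact ⟨⟨⟨hC.1, hqb.1⟩, by omega⟩, hC.2⟩
        rw [hb]
        simp
      · rw [if_neg hm, List.append_nil]
        have hb : (r == 0 && decide (1 ≤ q) && decide (q ≤ n) && q != x) = false := by
          rw [Bool.eq_false_iff]
          intro hcon
          simp only [Bool.and_eq_true, beq_iff_eq, decide_eq_true_eq, bne_iff_ne] at hcon
          exact hm ((PySem.List.mem_pyRange_one).mpr ⟨hcon.1.1.2, by omega⟩)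
        rw [hb]
        simp
    · have hfun : (fun y => if y = q ∧ (r = 0 ∧ q ≠ x) then [(x, y), (y, x)] else ([] : List (Int × Int)))
          = (fun _ : Int => ([] : List (Int × Int))) := by
        funext y
        rw [if_neg (fun h' => hC h'.2)]
      rw [hfun]
      have hb : (r == 0 && decide (1 ≤ q) && decide (q ≤ n) && q != x) = false := by
        rw [Bool.eq_false_iff]
        intro hcon
        simp only [Bool.and_eq_true, beq_iff_eq, decide_eq_true_eq, bne_iff_ne] at hcon
        exact hC ⟨hcon.1.1.1, hcon.2⟩
      rw [hb]
      simp
  -- the pointwise equality of the two inner bodies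
  · intro y hy acc'
    have hy' := (PySem.List.mem_pyRange_one).mp hy
    by_cases hxy : x = y
    · subst hxy
      simp only [beq_self_eq_true, if_pos]
      have hno : ¬(x = q ∧ r = 0 ∧ q ≠ x) := by rintro ⟨rfl, -, hne⟩; exact hne rfl
      rw [if_neg hno, List.append_nil]
    · have hbeq : (x == y) = false := by simp [hxy]
      rw [hbeq]
      simp only [Bool.false_eq_true, if_false]
      have hyx : y ∈ (PySem.List.pyRange 1 (n + 1) 1).erase x :=
        (List.mem_erase_of_ne (fun h' => hxy h'.symm)).mpr hy
      rw [PySem.List.remove?_eq_some_erase _ x hxmem, Option.getD_some,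
          PySem.List.remove?_eq_some_erase _ y hyx, Option.getD_some]
      have hs1 : x + ((PySem.List.pyRange 1 (n + 1) 1).erase x).sum
          = (PySem.List.pyRange 1 (n + 1) 1).sum := List.sum_erase hxmem
      have hs2 : y + (((PySem.List.pyRange 1 (n + 1) 1).erase x).erase y).sum
          = ((PySem.List.pyRange 1 (n + 1) 1).erase x).sum := List.sum_erase hyx
      have hsum : (((PySem.List.pyRange 1 (n + 1) 1).erase x).erase y).sum = S - x - y := by
        omega
      rw [hsum]
      have hcond : x * y = S - x - y ↔ (y = q ∧ (r = 0 ∧ q ≠ x)) := by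
        constructor
        · intro h'
          have hmul : y * (x + 1) = S - x := by linear_combination h'
          have hd : (x + 1) ∣ (S - x) := ⟨y, by linear_combination -hmul⟩
          have hqy : q = y :=
            mul_right_cancel₀ (by omega : (x + 1 : Int) ≠ 0) (by rw [hqmul hd, hmul])
          exact ⟨hqy.symm, hdvd_iff.mpr hd, fun h'' => hxy (by omega)⟩
        · rintro ⟨rfl, hr0, -⟩
          have hqm := hqmul (hdvd_iff.mp hr0)
          linear_combination hqm
      by_cases hc : x * y = S - x - y
      · rw [if_pos (by simpa using hc), if_pos (hcond.mp hc)]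
        simp
      · rw [if_neg (by simpa using hc), if_neg (fun h' => hc (hcond.mpr h')), List.append_nil]

-- ===== VERDICT (by name: the statement is the Claim_ definition above) =====
theorem removNb_one_spec : Claim_equal_removNb_one := by
  intro n _
  unfold Spec_removNb_one removNb_one removNb_one_alt
  simp only []
  apply PySem.List.foldl_congr_mem'
  intro x hx acc
  have hx' := (PySem.List.mem_pyRange_one).mp hx
  have hn : 0 ≤ n := by omega
  rw [inner_loop_eq n x _ _ _ hx'.1 (by omega) rfl rfl rfl acc, total_eq_sum n hn]
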